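-- pv_equiv track=rewrite | github.com/benquick123/code-profiling | code/batch-2/vse-naloge-brez-testov/DN7-M-064.py | varen_premik
-- ===== SOURCE A (Python) =====
-- def varen_premik(x0, y0, x1, y1, mine):
--     """
--     Vrni `True`, če je pomik z (x0, y0) and (x1, y1) varen, `False`, če ni.
--
--     Args:
--         x0 (int): koordinata x začetnega polja
--         y0 (int): koordinata y začetnega polja
--         x1 (int): koordinata x končnega polja
--         y1 (int): koordinata y končnega polja
--         mine (set of tuple of int): koordinate min
--
--     Returns:
--         bool: `True`, če je premik varen, `False`, če ni.
--     """
--     a = abs(x0 - x1)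
--     b = abs(y0 - y1)
--     if x0 == x1:
--         for i in range(b + 1):
--             g = (x0, min(y0, y1) + i)
--             if g in mine:
--                 return False
--     if y0 == y1:
--         for o in range(a + 1):
--             f = (min(x0, x1) + o, y0)
--             if f in mine:
--                 return False
--
--
--     return True
-- ===== SOURCE B (Python) =====
-- def varen_premik(x0, y0, x1, y1, mine):
--     for mx, my in mine:
--         if x0 == x1 and mx == x0 and min(y0, y1) <= my <= max(y0, y1):
--             return False
--         if y0 == y1 and my == y0 and min(x0, x1) <= mx <= max(x0, x1):
--             return False
--     return True
-- ===== Notes on version B (the rewrite author's own statement) =====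
-- stated objective: faster
-- what changed: B iterates over the mines once and tests each mine arithmetically for lying on the move's segment, instead of A's enumeration of every cell on the path with a membership test per cell.
import Mathlib
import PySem

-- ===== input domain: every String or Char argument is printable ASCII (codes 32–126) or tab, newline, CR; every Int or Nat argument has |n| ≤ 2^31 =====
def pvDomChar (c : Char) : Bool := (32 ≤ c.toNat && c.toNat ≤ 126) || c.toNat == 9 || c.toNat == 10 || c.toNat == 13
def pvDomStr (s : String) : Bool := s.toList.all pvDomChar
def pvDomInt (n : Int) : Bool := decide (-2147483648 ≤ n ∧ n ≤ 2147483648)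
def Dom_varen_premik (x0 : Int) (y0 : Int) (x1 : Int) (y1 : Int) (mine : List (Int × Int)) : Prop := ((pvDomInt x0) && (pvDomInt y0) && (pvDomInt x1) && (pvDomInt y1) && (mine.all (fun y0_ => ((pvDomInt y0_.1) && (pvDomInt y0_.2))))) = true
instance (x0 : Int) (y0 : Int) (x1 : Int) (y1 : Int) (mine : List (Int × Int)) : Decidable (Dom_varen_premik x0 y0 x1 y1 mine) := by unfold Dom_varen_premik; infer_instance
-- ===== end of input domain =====

-- B tests each mine arithmetically for lying on the move's segment (one pass over the
-- mines) instead of A's per-cell walk along the path with a membership test per cell.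

-- ===== PORT A =====
-- A walks the cells of the vertical segment (if x0 == x1) and then the horizontal
-- segment (if y0 == y1), returning False on the first cell found in `mine`; the
-- early-returning `for`/`in` loops are transcribed as `List.any` over the same range.
def varen_premik (x0 : Int) (y0 : Int) (x1 : Int) (y1 : Int) (mine : List (Int × Int)) : Bool :=
  let a : Int := |x0 - x1|
  let b : Int := |y0 - y1|
  if (x0 == x1) && (PySem.List.pyRange 0 (b + 1) 1).any
      (fun i => mine.contains (x0, min y0 y1 + i)) then
    false
  else if (y0 == y1) && (PySem.List.pyRange 0 (a + 1) 1).any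
      (fun o => mine.contains (min x0 x1 + o, y0)) then
    false
  else
    true

-- ===== PORT B =====
-- B: one pass over `mine`; a mine kills the move iff it lies on the move's segment.
def varen_premik_alt (x0 : Int) (y0 : Int) (x1 : Int) (y1 : Int) (mine : List (Int × Int)) : Bool :=
  mine.all (fun p =>
    !(((x0 == x1) && (p.1 == x0) && decide (min y0 y1 ≤ p.2 ∧ p.2 ≤ max y0 y1)) ||
      ((y0 == y1) && (p.2 == y0) && decide (min x0 x1 ≤ p.1 ∧ p.1 ≤ max x0 x1))))

-- ===== PRECONDITION & SPEC =====
def Spec_varen_premik (x0 : Int) (y0 : Int) (x1 : Int) (y1 : Int) (mine : List (Int × Int)) (out : Bool) : Prop := out = varen_premik_alt x0 y0 x1 y1 mine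
instance (x0 : Int) (y0 : Int) (x1 : Int) (y1 : Int) (mine : List (Int × Int)) (out : Bool) : Decidable (Spec_varen_premik x0 y0 x1 y1 mine out) := by unfold Spec_varen_premik; infer_instance

-- ===== CLAIM (what is proved, stated in full; the proofs are below) =====
def Claim_equal_varen_premik : Prop := ∀ (x0 : Int) (y0 : Int) (x1 : Int) (y1 : Int) (mine : List (Int × Int)), Dom_varen_premik x0 y0 x1 y1 mine → Spec_varen_premik x0 y0 x1 y1 mine (varen_premik x0 y0 x1 y1 mine)

-- ===== LEMMAS AND PROOFS =====

-- The cell walk over one axis-aligned segment finds a mine iff some mine satisfies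
-- the arithmetic on-segment test for that segment.
theorem seg_any (x m b : Int) (mine : List (Int × Int)) :
    ((PySem.List.pyRange 0 (b + 1) 1).any (fun i => mine.contains (x, m + i)))
      = mine.any (fun p => p.1 == x && decide (m ≤ p.2 ∧ p.2 ≤ m + b)) := by
  rw [Bool.eq_iff_iff]
  simp only [List.any_eq_true, PySem.List.mem_pyRange_one, List.contains_iff_mem,
    Bool.and_eq_true, beq_iff_eq, decide_eq_true_eq]
  constructor
  · rintro ⟨i, ⟨h0, h1⟩, hmem⟩
    exact ⟨(x, m + i), hmem, rfl, by omega, by omega⟩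
  · rintro ⟨⟨px, py⟩, hmem, hx, h1, h2⟩
    refine ⟨py - m, ⟨by omega, by omega⟩, ?_⟩
    have h3 : m + (py - m) = py := by ring
    rw [h3, ← hx] at *
    exact hmem

-- Same for the horizontal segment (the varying coordinate is the first one).
theorem seg_any' (y m a : Int) (mine : List (Int × Int)) :
    ((PySem.List.pyRange 0 (a + 1) 1).any (fun o => mine.contains (m + o, y)))
      = mine.any (fun p => p.2 == y && decide (m ≤ p.1 ∧ p.1 ≤ m + a)) := by
  rw [Bool.eq_iff_iff]
  simp only [List.any_eq_true, PySem.List.mem_pyRange_one, List.contains_iff_mem,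
    Bool.and_eq_true, beq_iff_eq, decide_eq_true_eq]
  constructor
  · rintro ⟨o, ⟨h0, h1⟩, hmem⟩
    exact ⟨(m + o, y), hmem, rfl, by omega, by omega⟩
  · rintro ⟨⟨px, py⟩, hmem, hy, h1, h2⟩
    refine ⟨px - m, ⟨by omega, by omega⟩, ?_⟩
    have h3 : m + (px - m) = px := by ring
    rw [h3, ← hy] at *
    exact hmem

-- ===== VERDICT (by name: the statement is the Claim_ definition above) =====
theorem varen_premik_spec : Claim_equal_varen_premik := by
  intro x0 y0 x1 y1 mine _
  unfold Spec_varen_premik varen_premik varen_premik_alt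
  dsimp only
  have hy : min y0 y1 + |y0 - y1| = max y0 y1 := by
    rcases le_total y0 y1 with h | h
    · rw [abs_of_nonpos (by omega)]; omega
    · rw [abs_of_nonneg (by omega)]; omega
  have hx : min x0 x1 + |x0 - x1| = max x0 x1 := by
    rcases le_total x0 x1 with h | h
    · rw [abs_of_nonpos (by omega)]; omega
    · rw [abs_of_nonneg (by omega)]; omega
  rw [seg_any x0 (min y0 y1) |y0 - y1| mine,
      seg_any' y0 (min x0 x1) |x0 - x1| mine, hy, hx]
  rw [Bool.eq_iff_iff]
  split_ifs with h1 h2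
  · simp only [Bool.and_eq_true, List.any_eq_true, beq_iff_eq, decide_eq_true_eq] at h1
    obtain ⟨hc, p, hp, hpx, hr⟩ := h1
    simp only [false_iff, List.all_eq_true, not_forall]
    refine ⟨p, ⟨hp, ?_⟩⟩
    simp [hc, hpx, hr]
  · simp only [Bool.and_eq_true, List.any_eq_true, beq_iff_eq, decide_eq_true_eq] at h2
    obtain ⟨hc, p, hp, hpy, hr⟩ := h2
    simp only [false_iff, List.all_eq_true, not_forall]
    refine ⟨p, ⟨hp, ?_⟩⟩
    simp [hc, hpy, hr]
  · simp only [Bool.and_eq_true, List.any_eq_true, beq_iff_eq, decide_eq_true_eq,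
      not_and, not_exists] at h1 h2
    simp only [true_iff, List.all_eq_true]
    intro p hp
    simp only [Bool.not_eq_true', Bool.or_eq_false_iff, Bool.and_eq_false_iff,
      beq_eq_false_iff_ne, ne_eq, decide_eq_false_iff_not, not_and, not_le]
    constructor
    · by_cases hc : x0 = x1
      · by_cases hpx : p.1 = x0
        · right
          intro hle
          have := h1 hc p hp hpx hle
          omega
        · left; right; exact hpx
      · simp [hc]
    · by_cases hc : y0 = y1
      · by_cases hpy : p.2 = y0
        · right
          intro hle
          have := h2 hc p hp hpy hle
          omega
        · left; right; exact hpy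
      · simp [hc]
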